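-- pv_equiv track=rewrite | github.com/Soilorian/prefetch-lenz | prefetchlenz/prefetchingalgorithm/impl/dspatch.py | decompress_pattern
-- ===== SOURCE A (Python) =====
-- CONFIG = {
--     "PAGE_SIZE": 4096,  # 4KB pages
--     "BLOCK_SIZE": 64,  # 64B cache blocks
--     "REGION_SIZE": 2048,  # 2KB regions (half page)
--     "BLOCKS_PER_PAGE": 64,  # 4KB / 64B = 64 blocks
--     "BLOCKS_PER_REGION": 32,  # 2KB / 64B = 32 blocks
--     "PB_ENTRIES": 64,  # Page Buffer entries
--     "SPT_ENTRIES": 256,  # Signature Pattern Table entries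
--     "COMPRESSION": True,  # Use 128B-granularity compression
--     "PATTERN_BITS": 32,  # Bits per pattern (after compression)
--     "MAX_OR_COUNT": 3,  # Maximum OR operations for CoP
--     "ACCURACY_THRESHOLD": 50,  # Accuracy threshold in percent
--     "COVERAGE_THRESHOLD": 50,  # Coverage threshold in percent
--     "BW_QUARTILES": 4,  # Bandwidth utilization quartiles
-- }
--
-- def decompress_pattern(compressed: int, pattern_size: int = 64) -> int:
--     """
--     Decompress 32-bit pattern back to 64-bit.
--     Each bit expands to two adjacent bits.
--     """
--     if not CONFIG["COMPRESSION"]: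
--         return compressed
--
--     pattern = 0
--     for i in range(pattern_size // 2):
--         if (compressed >> i) & 1:
--             pattern |= (3 << (i * 2))  # Set both adjacent bits
--     return pattern
-- ===== SOURCE B (Python) =====
-- CONFIG = {
--     "PAGE_SIZE": 4096,  # 4KB pages
--     "BLOCK_SIZE": 64,  # 64B cache blocks
--     "REGION_SIZE": 2048,  # 2KB regions (half page)
--     "BLOCKS_PER_PAGE": 64,  # 4KB / 64B = 64 blocks
--     "BLOCKS_PER_REGION": 32,  # 2KB / 64B = 32 blocks
--     "PB_ENTRIES": 64,  # Page Buffer entries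
--     "SPT_ENTRIES": 256,  # Signature Pattern Table entries
--     "COMPRESSION": True,  # Use 128B-granularity compression
--     "PATTERN_BITS": 32,  # Bits per pattern (after compression)
--     "MAX_OR_COUNT": 3,  # Maximum OR operations for CoP
--     "ACCURACY_THRESHOLD": 50,  # Accuracy threshold in percent
--     "COVERAGE_THRESHOLD": 50,  # Coverage threshold in percent
--     "BW_QUARTILES": 4,  # Bandwidth utilization quartiles
-- }
--
-- # Precomputed table: byte b -> its bits spread to pairs, both bits of each pair set.
-- _SPREAD = tuple(sum(3 << (2 * i) for i in range(8) if (b >> i) & 1) for b in range(256))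
--
-- def decompress_pattern(compressed: int, pattern_size: int = 64) -> int:
--     """Table-driven decompression: process the masked input a byte at a time."""
--     if not CONFIG["COMPRESSION"]:
--         return compressed
--
--     n = max(pattern_size // 2, 0)
--     x = compressed % (1 << n)
--     out = 0
--     for shift in range(0, n, 8):
--         out += _SPREAD[(x >> shift) & 255] << (2 * shift)
--     return out
-- ===== Notes on version B (the rewrite author's own statement) =====
-- stated objective: faster
-- what changed: A tests pattern_size//2 bits one at a time and ORs in 3<<(2*i) per set bit; B masks the input to pattern_size//2 bits with one modulo and then consumes it a byte at a time through a precomputed 256-entry spread table, doing one table lookup and one shifted add per 8 bits.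
import Mathlib
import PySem

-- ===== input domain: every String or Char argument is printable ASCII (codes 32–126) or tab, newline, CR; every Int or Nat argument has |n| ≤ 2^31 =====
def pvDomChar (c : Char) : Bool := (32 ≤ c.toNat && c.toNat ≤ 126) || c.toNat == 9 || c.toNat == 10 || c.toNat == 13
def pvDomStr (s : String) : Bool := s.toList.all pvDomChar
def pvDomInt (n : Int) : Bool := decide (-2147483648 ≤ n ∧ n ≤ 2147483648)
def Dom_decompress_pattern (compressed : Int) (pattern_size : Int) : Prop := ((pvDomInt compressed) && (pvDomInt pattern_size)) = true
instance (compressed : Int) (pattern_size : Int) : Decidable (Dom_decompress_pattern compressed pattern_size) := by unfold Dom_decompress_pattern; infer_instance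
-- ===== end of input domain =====

-- B replaces A's bit-by-bit loop with a precomputed 256-entry table applied to the masked input one byte at a time.


-- ===== PORT A =====
-- CONFIG["COMPRESSION"] — the only CONFIG field either function reads
def CONFIG_COMPRESSION : Bool := true

def decompress_pattern (compressed : Int) (pattern_size : Int) : Int :=
  if !CONFIG_COMPRESSION then compressed
  else
    -- for i in range(pattern_size // 2): if (compressed >> i) & 1: pattern |= (3 << (i * 2))
    -- every i in the range is ≥ 0, so `.toNat` on the shift amounts is exact
    (PySem.List.pyRange 0 (PySem.Int.floordiv pattern_size 2) 1).foldl
      (fun pattern i =>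
        if PySem.Int.band (compressed >>> i.toNat) 1 ≠ 0 then
          PySem.Int.bor pattern ((3 : Int) <<< (i * 2).toNat)
        else pattern) 0

-- ===== PORT B =====
-- _SPREAD = tuple(sum(3 << (2 * i) for i in range(8) if (b >> i) & 1) for b in range(256))
def spreadTable : List Int :=
  (List.range 256).map (fun b =>
    (((List.range 8).filter (fun i => ((b >>> i) &&& 1) != 0)).map
      (fun i : Nat => (3 : Int) <<< (2 * i))).sum)

def decompress_pattern_alt (compressed : Int) (pattern_size : Int) : Int :=
  if !CONFIG_COMPRESSION then compressed
  else
    let n : Int := max (PySem.Int.floordiv pattern_size 2) 0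
    -- x = compressed % (1 << n); n ≥ 0, so `.toNat` is exact
    let x : Int := PySem.Int.mod compressed ((1 : Int) <<< n.toNat)
    -- for shift in range(0, n, 8): out += _SPREAD[(x >> shift) & 255] << (2 * shift)
    -- shift ≥ 0 throughout; the table index is always in [0, 256), so pyGetD's default is never used
    (PySem.List.pyRange 0 n 8).foldl
      (fun out shift =>
        out + (PySem.List.pyGetD spreadTable (PySem.Int.band (x >>> shift.toNat) 255) 0)
                <<< (2 * shift).toNat) 0

-- ===== PRECONDITION & SPEC =====
def Spec_decompress_pattern (compressed : Int) (pattern_size : Int) (out : Int) : Prop := out = decompress_pattern_alt compressed pattern_size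
instance (compressed : Int) (pattern_size : Int) (out : Int) : Decidable (Spec_decompress_pattern compressed pattern_size out) := by unfold Spec_decompress_pattern; infer_instance

-- ===== CLAIM (what is proved, stated in full; the proofs are below) =====
def Claim_equal_decompress_pattern : Prop := ∀ (compressed : Int) (pattern_size : Int), Dom_decompress_pattern compressed pattern_size → Spec_decompress_pattern compressed pattern_size (decompress_pattern compressed pattern_size)

-- ===== LEMMAS AND PROOFS =====

-- the common value: bits i < n of x, each expanded to the pair of bits 2i, 2i+1
def fN (x n : Nat) : Nat :=
  ((List.range n).map (fun i => if x.testBit i then 3 * 4 ^ i else 0)).sum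

theorem fN_succ (x n : Nat) :
    fN x (n + 1) = fN x n + (if x.testBit n then 3 * 4 ^ n else 0) := by
  simp [fN, List.range_succ]

theorem fN_lt (x n : Nat) : fN x n < 4 ^ n := by
  induction n with
  | zero => simp [fN]
  | succ n ih =>
    have h4 : (4 : Nat) ^ (n + 1) = 4 ^ n * 4 := pow_succ 4 n
    rw [fN_succ]; split <;> omega

theorem lor_disj (a b k : Nat) (h : a < 2 ^ k) : a ||| b <<< k = a + b <<< k := by
  rw [Nat.lor_comm, ← Nat.shiftLeft_add_eq_or_of_lt h b, Nat.add_comm]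

theorem natCast_shiftRight (X k : Nat) : (X : Int) >>> ((k : Int)) = ((X >>> k : Nat) : Int) := by
  rw [Int.shiftRight_natCast_right]; exact Int.mem_toNat?.mp rfl

-- `(c >> i) & 1` reads bit i of c, which for i < m is bit i of c % 2^m
theorem band_bit (c : Int) (m i : Nat) (hi : i < m) :
    PySem.Int.band (c >>> i) 1
      = if ((c % ((2 : Int) ^ m)).toNat).testBit i then 1 else 0 := by
  set X : Nat := (c % ((2 : Int) ^ m)).toNat with hXdef
  set q : Int := c / 2 ^ m with hqdef
  have hX : (X : Int) = c % 2 ^ m := Int.toNat_of_nonneg (Int.emod_nonneg c (by positivity))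
  have h2 : (2 : Int) ^ (m - i) * 2 ^ i = 2 ^ m := by rw [← pow_add]; congr 1; omega
  have h3 : (2 : Int) ^ m * q + c % 2 ^ m = c := Int.mul_ediv_add_emod c ((2 : Int) ^ m)
  have hc : c = (X : Int) + (2 ^ (m - i) * q) * 2 ^ i := by rw [hX]; linear_combination -h3 - q * h2
  rw [PySem.Int.band_one, PySem.Int.mod_eq_emod_of_pos (by norm_num : (0:Int) < 2),
      Int.shiftRight_eq_div_pow]
  have hdiv : c / ((2 ^ i : Nat) : Int) = (X : Int) / ((2 ^ i : Nat) : Int) + 2 ^ (m - i) * q := by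
    push_cast
    rw [hc, Int.add_mul_ediv_right _ _ (by positivity : ((2:Int) ^ i) ≠ 0)]
  rw [hdiv]
  have hsplit : (2 : Int) ^ (m - i) = 2 * 2 ^ (m - i - 1) := by
    rw [← pow_succ']; congr 1; omega
  rw [hsplit]
  have hmod : ((X : Int) / ((2 ^ i : Nat) : Int) + 2 * 2 ^ (m - i - 1) * q) % 2
      = ((X : Int) / ((2 ^ i : Nat) : Int)) % 2 := by
    rw [mul_assoc, Int.add_mul_emod_self_left]
  rw [hmod]
  have hcast : ((X : Int) / ((2 ^ i : Nat) : Int)) % 2 = ((X / 2 ^ i % 2 : Nat) : Int) := by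
    push_cast; rfl
  rw [hcast, Nat.testBit_eq_decide_div_mod_eq]
  rcases Nat.mod_two_eq_zero_or_one (X / 2 ^ i) with h | h <;> simp [h]

-- A's loop computes fN
theorem foldA (c : Int) (X : Nat) (m : Nat)
    (hb : ∀ i, i < m → PySem.Int.band (c >>> i) 1 = if X.testBit i then 1 else 0) :
    List.foldl (fun pattern i =>
        if PySem.Int.band (c >>> i.toNat) 1 ≠ 0 then
          PySem.Int.bor pattern ((3 : Int) <<< (i * 2).toNat)
        else pattern) 0 ((List.range m).map (fun k : Nat => (k : Int)))
      = (fN X m : Int) := by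
  induction m with
  | zero => simp [fN]
  | succ m ih =>
    rw [List.range_succ, List.map_append, List.foldl_append]
    rw [ih (fun i hi => hb i (Nat.lt_succ_of_lt hi))]
    have hbm := hb m (Nat.lt_succ_self m)
    simp only [List.map_cons, List.map_nil, List.foldl_cons, List.foldl_nil]
    rw [Int.toNat_natCast, Int.shiftRight_natCast_right]
    rw [hbm, fN_succ]
    by_cases ht : X.testBit m
    · simp only [ht, ne_eq, one_ne_zero, not_false_iff, if_pos]
      have hsh : ((m : Int) * 2).toNat = 2 * m := by omega
      rw [hsh, Int.shiftLeft_natCast_right, Int.shiftLeft_eq]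
      have hcast : (3 : Int) * 2 ^ (2 * m) = ((3 * 2 ^ (2 * m) : Nat) : Int) := by push_cast; ring
      rw [hcast, PySem.Int.bor_natCast]
      have h2m : (3 : Nat) * 2 ^ (2 * m) = 3 <<< (2 * m) := by rw [Nat.shiftLeft_eq]
      have hlt : fN X m < 2 ^ (2 * m) := by
        have : (4 : Nat) ^ m = 2 ^ (2 * m) := by rw [pow_mul]; norm_num
        rw [← this]; exact fN_lt X m
      rw [h2m, lor_disj _ _ _ hlt]
      push_cast [Nat.shiftLeft_eq]
      have h4i : (4 : Int) ^ m = 2 ^ (2 * m) := by rw [pow_mul]; norm_num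
      rw [h4i]
    · simp [ht]

theorem bitcond (b i : Nat) : (((b >>> i) &&& 1) != 0) = b.testBit i := by
  simp only [Nat.and_one_is_mod, Nat.shiftRight_eq_div_pow, Nat.testBit_eq_decide_div_mod_eq]
  rcases Nat.mod_two_eq_zero_or_one (b / 2 ^ i) with h | h <;> simp [h]

theorem sum_filter_map (l : List Nat) (p : Nat → Bool) (g : Nat → Int) :
    ((l.filter p).map g).sum = (l.map (fun i => if p i then g i else 0)).sum := by
  induction l with
  | nil => simp
  | cons a l ih =>
    rw [List.filter_cons]
    by_cases h : p a <;> simp [h, ih]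

-- the table entry at b < 256 is fN b 8
theorem spread_lookup (b : Nat) (hb : b < 256) :
    PySem.List.pyGetD spreadTable (b : Int) 0 = (fN b 8 : Int) := by
  rw [PySem.List.pyGetD_natCast]
  have hlen : b < spreadTable.length := by simp [spreadTable]; omega
  rw [List.getD_eq_getElem _ _ hlen]
  simp only [spreadTable, List.getElem_map, List.getElem_range]
  rw [sum_filter_map]
  have : ∀ i ∈ List.range 8,
      (if ((b >>> i) &&& 1) != 0 then ((3 : Int) <<< (2 * i) : Int) else 0)
        = ((if b.testBit i then 3 * 4 ^ i else 0 : Nat) : Int) := by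
    intro i _
    rw [bitcond]
    by_cases h : b.testBit i <;> simp [h, Int.shiftLeft_eq]
    rw [pow_mul]; norm_num
  rw [List.map_congr_left this, fN, Nat.cast_list_sum, List.map_map]
  rfl

theorem fN_add (x a b : Nat) :
    fN x (a + b) = fN x a + ((List.range b).map (fun i => if x.testBit (a + i) then 3 * 4 ^ (a + i) else 0)).sum := by
  rw [fN, List.range_add, List.map_append, List.sum_append, fN, List.map_map]
  rfl

theorem byte_testBit (X K i : Nat) (hi : i < 8) :
    ((X >>> (8 * K)) &&& 255).testBit i = X.testBit (8 * K + i) := by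
  rw [Nat.testBit_and, Nat.testBit_shiftRight]
  have h255 : (255 : Nat) = 2 ^ 8 - 1 := by norm_num
  rw [h255, Nat.testBit_two_pow_sub_one]
  simp [hi]

-- the byte-chunk sums assemble fN
theorem chunks (X : Nat) (K : Nat) :
    ((List.range K).map (fun j => (fN ((X >>> (8 * j)) &&& 255) 8) * 2 ^ (16 * j))).sum
      = fN X (8 * K) := by
  induction K with
  | zero => simp [fN]
  | succ K ih =>
    rw [List.range_succ, List.map_append, List.sum_append, ih]
    simp only [List.map_cons, List.map_nil, List.sum_cons, List.sum_nil, Nat.add_zero]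
    rw [show 8 * (K + 1) = 8 * K + 8 by ring, fN_add]
    congr 1
    rw [fN, ← List.sum_map_mul_right]
    apply congrArg
    apply List.map_congr_left
    intro i hi
    have hi8 : i < 8 := List.mem_range.mp hi
    rw [byte_testBit X K i hi8]
    by_cases h : X.testBit (8 * K + i) <;> simp [h]
    rw [pow_add, show 16 * K = (8 * K) * 2 by ring, show (4:Nat) = 2^2 by norm_num,
        ← pow_mul, ← pow_mul]
    ring

theorem fN_stable (X m n : Nat) (hX : X < 2 ^ m) (h : m ≤ n) : fN X n = fN X m := by
  rw [show n = m + (n - m) by omega, fN_add]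
  have : ∀ i ∈ List.range (n - m), (if X.testBit (m + i) then 3 * 4 ^ (m + i) else 0) = 0 := by
    intro i _
    have : X < 2 ^ (m + i) := lt_of_lt_of_le hX (Nat.pow_le_pow_right (by norm_num) (by omega))
    simp [Nat.testBit_eq_false_of_lt this]
  rw [List.map_congr_left this]
  simp

theorem main_eq (c ps : Int) : decompress_pattern c ps = decompress_pattern_alt c ps := by
  rw [decompress_pattern, decompress_pattern_alt]
  simp only [CONFIG_COMPRESSION, Bool.not_true, Bool.false_eq_true, if_false]
  set M : Int := PySem.Int.floordiv ps 2 with hMdef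
  by_cases hM : M ≤ 0
  · have hmax : max M 0 = 0 := by omega
    rw [hmax]
    rw [PySem.List.pyRange_of_pos 0 M (by norm_num : (0:Int) < 1),
        PySem.List.pyRange_of_pos 0 0 (by norm_num : (0:Int) < 8)]
    rw [if_neg (by omega), if_neg (by omega)]
    simp
  · have hM' : 0 < M := by omega
    set m : Nat := M.toNat with hmdef
    have hMm : M = (m : Int) := (Int.toNat_of_nonneg hM'.le).symm
    have hm0 : 0 < m := by omega
    have hmax : max M 0 = M := by omega
    rw [hmax]
    have hsh1 : (1 : Int) <<< M.toNat = 2 ^ m := by rw [Int.shiftLeft_eq, one_mul]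
    rw [hsh1]
    set X : Nat := (c % ((2 : Int) ^ m)).toNat with hXdef
    have hXc : (X : Int) = c % 2 ^ m := Int.toNat_of_nonneg (Int.emod_nonneg c (by positivity))
    have hmodX : PySem.Int.mod c (2 ^ m) = (X : Int) := by
      rw [PySem.Int.mod_eq_emod_of_pos (by positivity), hXc]
    rw [hmodX]
    -- A side
    rw [hMm, PySem.List.pyRange_zero_natCast]
    rw [foldA c X m (fun i hi => band_bit c m i hi)]
    -- B side
    set K : Nat := (m + 7) / 8 with hKdef
    have hKeq : (((m : Int) - 0 + 8 - 1) / 8).toNat = K := by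
      have : ((m : Int) - 0 + 8 - 1) / 8 = (K : Int) := by
        rw [hKdef]; push_cast [Int.natCast_div]; omega
      rw [this, Int.toNat_natCast]
    rw [PySem.List.pyRange_of_pos 0 ((m : Int)) (by norm_num : (0:Int) < 8),
        if_pos (by exact_mod_cast hm0), hKeq]
    rw [PySem.List.foldl_add, List.map_map, zero_add]
    simp only [Function.comp_def]
    have hterm : ∀ j ∈ List.range K,
        (PySem.List.pyGetD spreadTable
            (PySem.Int.band ((X : Int) >>> (((((0 + 8 * (j:Int))).toNat : Nat)) : Int)) 255) 0)
            <<< ((((2 * (0 + 8 * (j:Int))).toNat : Nat)) : Int)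
          = ((fN ((X >>> (8 * j)) &&& 255) 8 * 2 ^ (16 * j) : Nat) : Int) := by
      intro j _
      have e1 : (((((0 + 8 * (j:Int))).toNat : Nat)) : Int) = ((8 * j : Nat) : Int) := by
        push_cast; omega
      have e2 : ((((2 * (0 + 8 * (j:Int))).toNat : Nat)) : Int) = ((16 * j : Nat) : Int) := by
        push_cast; omega
      rw [e1, e2, natCast_shiftRight]
      rw [show (255 : Int) = ((255 : Nat) : Int) from rfl, PySem.Int.band_natCast]
      have hbyte : (X >>> (8 * j)) &&& 255 < 256 := by
        have hb2 : (X >>> (8 * j)) &&& 255 ≤ 255 := Nat.and_le_right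
        omega
      rw [spread_lookup _ hbyte, Int.shiftLeft_natCast_right, Int.shiftLeft_eq]
      push_cast
      ring
    rw [List.map_congr_left hterm]
    have hcs : ((List.range K).map
          (fun j : Nat => ((fN ((X >>> (8 * j)) &&& 255) 8 * 2 ^ (16 * j) : Nat) : Int))).sum
        = ((fN X (8 * K) : Nat) : Int) := by
      rw [← chunks X K, Nat.cast_list_sum, List.map_map]
      rfl
    rw [hcs]
    have hXlt : X < 2 ^ m := by
      have h1 : c % ((2:Int) ^ m) < 2 ^ m := Int.emod_lt_of_pos c (by positivity)
      have h2 : ((X : Int)) < 2 ^ m := hXc ▸ h1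
      exact_mod_cast h2
    rw [fN_stable X m (8 * K) hXlt (by omega)]

-- ===== VERDICT (by name: the statement is the Claim_ definition above) =====
theorem decompress_pattern_spec : Claim_equal_decompress_pattern := by
  intro c ps _
  unfold Spec_decompress_pattern
  exact main_eq c ps
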